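-- pv_equiv track=rewrite | github.com/melikazmn/mabani-python | سماق‌فارم.py | somagh
-- ===== SOURCE A (Python) =====
-- def somagh(l):
--     i = [max(l),min(l)]
--     for m in i:
--         ind = l.index(m)
--
--         if ind == len(l) - 1 and l[ind-1] > m: #dare payan
--             if l[:ind] != (sorted(l[:ind]))[::-1]:
--                  res =  'No'
--             else:
--                 res ='Yes'
--
--         elif ind == len(l) - 1 and l[ind-1] < m:#ghole payan
--             if l[:ind] != sorted(l[:ind]):
--                 res = 'No'
--             else:
--                 res = 'Yes'
--
--         elif ind == 0 and l[ind+1] > m:#dare aval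
--             if l[ind+1:] != sorted(l[ind+1:]):
--                 res = 'No'
--             else:
--                 res = 'Yes'
--         elif ind == 0 and l[ind+1] < m:#ghole aval
--             if l[ind+1:] != sorted(l[ind+1:])[::-1]:
--                  res = 'No'
--             else:
--                 res = 'Yes'
--
--         elif l[ind+1] > m : #dare
--             if l[ind+1:] != sorted(l[ind+1:]):
--                 res = 'No'
--             elif l[:ind] != (sorted(l[:ind]))[::-1]:
--                  res = 'No'
--             else:
--                 res = 'Yes'
--
--         elif l[ind+1] < m :#ghole
--             if l[ind+1:] != sorted(l[ind+1:])[::-1]: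
--                  res = 'No'
--
--             elif l[:ind] != sorted(l[:ind]):
--                 res = 'No'
--             else:
--                 res = 'Yes'
--
--         if res == 'Yes':
--             return 'Yes'
--
--     return res
-- ===== SOURCE B (Python) =====
-- def somagh(l):
--     # Linear two-scan check: the list says 'Yes' iff it is up-then-down
--     # (mountain) or down-then-up (valley), non-strictly.
--     n = len(l)
--     i = 0
--     while i + 1 < n and l[i] <= l[i + 1]:
--         i += 1
--     if all(l[j] >= l[j + 1] for j in range(i, n - 1)):
--         return 'Yes'
--     i = 0
--     while i + 1 < n and l[i] >= l[i + 1]: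
--         i += 1
--     if all(l[j] <= l[j + 1] for j in range(i, n - 1)):
--         return 'Yes'
--     return 'No'
-- ===== Notes on version B (the rewrite author's own statement) =====
-- stated objective: faster
-- what changed: Replaces max/min lookup, list.index, slicing and sorted()-equality comparisons by two direct linear monotonicity scans (ascend-then-check-descent for a mountain, the reverse for a valley).
-- intended difference: On lists that are a valley (non-increasing then non-decreasing) but not a mountain and whose minimum occurs more than once, A returns the stale 'No' left over from its max-iteration because no branch fires for the duplicated minimum, while B returns the intended 'Yes' since such a list is a valid valley. — e.g. on somagh([1, 0, 0, 1]): A returns "No", B returns "Yes"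
import Mathlib
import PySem

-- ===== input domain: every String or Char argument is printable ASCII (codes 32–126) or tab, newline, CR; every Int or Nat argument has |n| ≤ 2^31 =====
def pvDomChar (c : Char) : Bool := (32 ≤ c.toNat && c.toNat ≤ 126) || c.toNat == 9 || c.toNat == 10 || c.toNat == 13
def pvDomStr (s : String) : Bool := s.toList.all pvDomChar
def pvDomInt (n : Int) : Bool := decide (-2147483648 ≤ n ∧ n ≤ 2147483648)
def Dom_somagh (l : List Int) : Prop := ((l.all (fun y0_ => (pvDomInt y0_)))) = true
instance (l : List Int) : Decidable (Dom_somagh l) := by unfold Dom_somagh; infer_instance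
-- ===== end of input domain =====

-- B replaces A's max/min + list.index + slice + sorted()-equality machinery by two linear
-- monotonicity scans (mountain check, then valley check); see D_somagh for the one corner fixed.

-- ===== PORT A =====
-- One iteration of A's `for m in [max(l), min(l)]` loop body; `res` is Python's local `res`
-- (none = still unbound).  `prev`/`nxt` port l[ind-1]/l[ind+1]: pyGetD is exact wherever
-- Python evaluates them inside Pre_somagh (out-of-range access only happens outside Pre_).
def somaghBranch (l : List Int) (m : Int) (res : Option String) : Option String :=
  match PySem.List.index? l m with
  | none => res  -- l.index(m) cannot fail: m = max(l)/min(l) is a member whenever l ≠ []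
  | some ind =>
    let prev := PySem.List.pyGetD l ((ind : Int) - 1) 0
    let nxt := PySem.List.pyGetD l ((ind : Int) + 1) 0
    let pre := PySem.List.slice l none (some (ind : Int))          -- l[:ind]
    let suf := PySem.List.slice l (some ((ind : Int) + 1)) none    -- l[ind+1:]
    if ind + 1 = l.length ∧ m < prev then
      some (if pre ≠ (PySem.List.sorted pre (fun x => x) false).reverse then "No" else "Yes")
    else if ind + 1 = l.length ∧ prev < m then
      some (if pre ≠ PySem.List.sorted pre (fun x => x) false then "No" else "Yes")
    else if ind = 0 ∧ m < nxt then
      some (if suf ≠ PySem.List.sorted suf (fun x => x) false then "No" else "Yes")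
    else if ind = 0 ∧ nxt < m then
      some (if suf ≠ (PySem.List.sorted suf (fun x => x) false).reverse then "No" else "Yes")
    else if m < nxt then
      some (if suf ≠ PySem.List.sorted suf (fun x => x) false then "No"
            else if pre ≠ (PySem.List.sorted pre (fun x => x) false).reverse then "No" else "Yes")
    else if nxt < m then
      some (if suf ≠ (PySem.List.sorted suf (fun x => x) false).reverse then "No"
            else if pre ≠ PySem.List.sorted pre (fun x => x) false then "No" else "Yes")
    else res

def somagh (l : List Int) : String :=
  match PySem.List.max? l (fun x => x), PySem.List.min? l (fun x => x) with
  | some mx, some mn =>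
    let r1 := somaghBranch l mx none
    if r1 = some "Yes" then "Yes"
    else
      let r2 := somaghBranch l mn r1
      if r2 = some "Yes" then "Yes"
      else r2.getD ""      -- `return res` with res still unbound happens only outside Pre_somagh
  | _, _ => ""             -- max([]) raises ValueError: outside Pre_somagh

-- ===== PORT B =====
-- `while i+1 < n and l[i] <= l[i+1]: i += 1` : drop the non-decreasing prefix
def scanUp : List Int → List Int
  | a :: b :: t => if a ≤ b then scanUp (b :: t) else a :: b :: t
  | xs => xs

def scanDown : List Int → List Int
  | a :: b :: t => if b ≤ a then scanDown (b :: t) else a :: b :: t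
  | xs => xs

-- `all(l[j] >= l[j+1] for j in range(i, n-1))` on the remaining suffix
def nonincB : List Int → Bool
  | a :: b :: t => b ≤ a && nonincB (b :: t)
  | _ => true

def nondecB : List Int → Bool
  | a :: b :: t => a ≤ b && nondecB (b :: t)
  | _ => true

def somagh_alt (l : List Int) : String :=
  if nonincB (scanUp l) then "Yes"
  else if nondecB (scanDown l) then "Yes"
  else "No"

-- ===== PRECONDITION & SPEC =====
-- Pre_ excludes exactly where A raises: lists of length < 2 (IndexError / UnboundLocalError)
-- and lists whose FIRST occurrence of the maximum is immediately followed by another maximum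
-- (no branch fires for max, `res` is unbound: UnboundLocalError).
def Pre_somagh (l : List Int) : Prop :=
  2 ≤ l.length ∧
    ¬ ∃ i : Fin l.length, ∃ _ : i.1 + 1 < l.length,
        l[i.1] = l[i.1 + 1] ∧ (∀ x ∈ l, x ≤ l[i.1]) ∧
        ∀ j : Fin l.length, j.1 < i.1 → l[j.1] ≠ l[i.1]
instance (l : List Int) : Decidable (Pre_somagh l) := by unfold Pre_somagh; infer_instance

def pvWitness_somagh : List Int := [0, 1, 0]

-- non-decreasing-then-non-increasing, non-strictly
def Mountain (l : List Int) : Prop :=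
  ∃ k ≤ l.length, List.IsChain (· ≤ ·) (l.take (k + 1)) ∧ List.IsChain (· ≥ ·) (l.drop k)

-- non-increasing-then-non-decreasing, non-strictly
def Valley (l : List Int) : Prop := Mountain (l.map (fun x => -x))

-- On lists that are a valley but not a mountain and contain an adjacent duplicated minimum,
-- A's min-iteration falls through every branch and A returns the stale 'No' left over from the
-- max-iteration, while B returns the intended 'Yes': such a list is a valid valley.
def D_somagh (l : List Int) : Prop :=
  Valley l ∧ ¬ Mountain l ∧ ∀ m ∈ PySem.List.min? l (fun x => x), [m, m] <:+: l
instance (l : List Int) : Decidable (D_somagh l) := by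
  unfold D_somagh Valley Mountain; infer_instance

def Spec_somagh (l : List Int) (out : String) : Prop := ¬ D_somagh l → out = somagh_alt l
instance (l : List Int) (out : String) : Decidable (Spec_somagh l out) := by
  unfold Spec_somagh; infer_instance

def pvDiffWitness_somagh : List Int := [1, 0, 0, 1]
def pvDiffWitnessOut_somagh : String × String := ("No", "Yes")

-- ===== CLAIM (what is proved, stated in full; the proofs are below) =====
def Claim_unchanged_somagh : Prop :=
  ∀ (l : List Int), Dom_somagh l → Pre_somagh l → Spec_somagh l (somagh l)
def Claim_changed_somagh : Prop :=
  Dom_somagh (pvDiffWitness_somagh) ∧ Pre_somagh (pvDiffWitness_somagh) ∧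
  D_somagh (pvDiffWitness_somagh) ∧
  somagh (pvDiffWitness_somagh) = pvDiffWitnessOut_somagh.1 ∧
  somagh_alt (pvDiffWitness_somagh) = pvDiffWitnessOut_somagh.2 ∧
  pvDiffWitnessOut_somagh.1 ≠ pvDiffWitnessOut_somagh.2
def Claim_exact_somagh : Prop :=
  ∀ (l : List Int), Dom_somagh l → Pre_somagh l → D_somagh l → somagh l ≠ somagh_alt l
-- ===== LEMMAS AND PROOFS =====

-- Valley, written out explicitly (proof-side form of the map-neg definition)
def ValleyE (l : List Int) : Prop :=
  ∃ k ≤ l.length, List.IsChain (· ≥ ·) (l.take (k + 1)) ∧ List.IsChain (· ≤ ·) (l.drop k)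

theorem valley_explicit (l : List Int) : Valley l ↔ ValleyE l := by
  unfold Valley Mountain ValleyE
  simp only [List.length_map, ← List.map_take, ← List.map_drop, List.isChain_map]
  refine exists_congr fun k => and_congr_right fun _ => and_congr ?_ ?_ <;>
    exact List.IsChain.iff (fun a b => by constructor <;> intro <;> omega)

theorem nonincB_iff : ∀ xs : List Int, nonincB xs = true ↔ xs.IsChain (· ≥ ·)
  | [] => by simp [nonincB]
  | [a] => by simp [nonincB]
  | a :: b :: t => by
    rw [nonincB, List.isChain_cons_cons, Bool.and_eq_true, decide_eq_true_iff,
      nonincB_iff (b :: t), ge_iff_le, and_comm]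

theorem nondecB_iff : ∀ xs : List Int, nondecB xs = true ↔ xs.IsChain (· ≤ ·)
  | [] => by simp [nondecB]
  | [a] => by simp [nondecB]
  | a :: b :: t => by
    rw [nondecB, List.isChain_cons_cons, Bool.and_eq_true, decide_eq_true_iff,
      nondecB_iff (b :: t), and_comm]

theorem mountain_nil : Mountain [] := ⟨0, by simp, by simp, by simp⟩

theorem mountain_single (a : Int) : Mountain [a] := ⟨0, by simp, by simp, by simp⟩

theorem valleyE_nil : ValleyE [] := ⟨0, by simp, by simp, by simp⟩

theorem valleyE_single (a : Int) : ValleyE [a] := ⟨0, by simp, by simp, by simp⟩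

theorem mountain_cons_of_le {a b : Int} {t : List Int} (hab : a ≤ b) :
    Mountain (a :: b :: t) ↔ Mountain (b :: t) := by
  constructor
  · rintro ⟨k, hk, h1, h2⟩
    cases k with
    | zero =>
      refine ⟨0, by simp, by simp, ?_⟩
      simp only [List.drop_zero] at h2 ⊢
      exact h2.tail
    | succ k' =>
      refine ⟨k', by simp at hk ⊢; omega, ?_, ?_⟩
      · rw [List.take_succ_cons] at h1
        exact h1.tail
      · simpa [List.drop_succ_cons] using h2
  · rintro ⟨k, hk, h1, h2⟩
    refine ⟨k + 1, by simp at hk ⊢; omega, ?_, by simpa [List.drop_succ_cons] using h2⟩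
    rw [List.take_succ_cons] at h1
    rw [List.take_succ_cons, List.take_succ_cons]
    exact List.isChain_cons_cons.mpr ⟨hab, h1⟩

theorem mountain_cons_of_gt {a b : Int} {t : List Int} (hba : b < a) :
    Mountain (a :: b :: t) ↔ (a :: b :: t).IsChain (· ≥ ·) := by
  constructor
  · rintro ⟨k, hk, h1, h2⟩
    cases k with
    | zero => simpa using h2
    | succ k' =>
      rw [List.take_succ_cons, List.take_succ_cons, List.isChain_cons_cons] at h1
      exact absurd h1.1 (not_le.mpr hba)
  · intro h
    exact ⟨0, by simp, by simp, by simpa using h⟩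

theorem valleyE_cons_of_ge {a b : Int} {t : List Int} (hab : b ≤ a) :
    ValleyE (a :: b :: t) ↔ ValleyE (b :: t) := by
  constructor
  · rintro ⟨k, hk, h1, h2⟩
    cases k with
    | zero =>
      refine ⟨0, by simp, by simp, ?_⟩
      simp only [List.drop_zero] at h2 ⊢
      exact h2.tail
    | succ k' =>
      refine ⟨k', by simp at hk ⊢; omega, ?_, ?_⟩
      · rw [List.take_succ_cons] at h1
        exact h1.tail
      · simpa [List.drop_succ_cons] using h2
  · rintro ⟨k, hk, h1, h2⟩
    refine ⟨k + 1, by simp at hk ⊢; omega, ?_, by simpa [List.drop_succ_cons] using h2⟩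
    rw [List.take_succ_cons] at h1
    rw [List.take_succ_cons, List.take_succ_cons]
    exact List.isChain_cons_cons.mpr ⟨hab, h1⟩

theorem valleyE_cons_of_lt {a b : Int} {t : List Int} (hba : a < b) :
    ValleyE (a :: b :: t) ↔ (a :: b :: t).IsChain (· ≤ ·) := by
  constructor
  · rintro ⟨k, hk, h1, h2⟩
    cases k with
    | zero => simpa using h2
    | succ k' =>
      rw [List.take_succ_cons, List.take_succ_cons, List.isChain_cons_cons] at h1
      exact absurd h1.1 (not_le.mpr hba)
  · intro h
    exact ⟨0, by simp, by simp, by simpa using h⟩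

theorem scanUp_iff : ∀ xs : List Int, nonincB (scanUp xs) = true ↔ Mountain xs
  | [] => iff_of_true rfl mountain_nil
  | [a] => iff_of_true rfl (mountain_single a)
  | a :: b :: t => by
    rw [scanUp]
    by_cases hab : a ≤ b
    · rw [if_pos hab, scanUp_iff (b :: t), mountain_cons_of_le hab]
    · rw [if_neg hab, nonincB_iff, mountain_cons_of_gt (by omega)]

theorem scanDown_iffE : ∀ xs : List Int, nondecB (scanDown xs) = true ↔ ValleyE xs
  | [] => iff_of_true rfl valleyE_nil
  | [a] => iff_of_true rfl (valleyE_single a)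
  | a :: b :: t => by
    rw [scanDown]
    by_cases hba : b ≤ a
    · rw [if_pos hba, scanDown_iffE (b :: t), valleyE_cons_of_ge hba]
    · rw [if_neg hba, nondecB_iff, valleyE_cons_of_lt (by omega)]

theorem mountain_iff_split (l : List Int) (ind : Nat) (hlt : ind < l.length)
    (hmax : ∀ y ∈ l, y ≤ l[ind]) (hfirst : ∀ j (hj : j < ind), l[j] ≠ l[ind]) :
    Mountain l ↔ (l.take ind).IsChain (· ≤ ·) ∧ (l.drop (ind + 1)).IsChain (· ≥ ·) := by
  constructor
  · rintro ⟨k, hk, h1, h2⟩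
    have hp1 : (l.take (k + 1)).Pairwise (· ≤ ·) := List.isChain_iff_pairwise.mp h1
    have hp2 : (l.drop k).Pairwise (· ≥ ·) := List.isChain_iff_pairwise.mp h2
    rw [List.pairwise_iff_getElem] at hp1 hp2
    have hik : ind ≤ k := by
      by_contra hgt
      push_neg at hgt
      have hkl : k < l.length := by omega
      have h := hp2 0 (ind - k) (by simp; omega) (by simp; omega) (by omega)
      simp only [List.getElem_drop] at h
      have hrw : k + (ind - k) = ind := by omega
      simp only [Nat.add_zero, hrw] at h
      have hle : l[k] ≤ l[ind] := hmax _ (List.getElem_mem hkl)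
      exact hfirst k hgt (le_antisymm hle h)
    refine ⟨?_, ?_⟩
    · have heq : l.take ind = (l.take (k + 1)).take ind := by
        rw [List.take_take]; congr 1; omega
      rw [heq, List.isChain_iff_pairwise]
      exact (List.isChain_iff_pairwise.mp h1).sublist (List.take_sublist _ _)
    · rw [List.isChain_iff_pairwise, List.pairwise_iff_getElem]
      intro i j hi hj hij
      simp only [List.length_drop] at hi hj
      simp only [List.getElem_drop]
      by_cases hpk : ind + 1 + i ≤ k
      · have h1' := hp1 ind (ind + 1 + i) (by simp; omega) (by simp; omega) (by omega)
        simp only [List.getElem_take] at h1'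
        have hplel : l[ind + 1 + i] ≤ l[ind] := hmax _ (List.getElem_mem (by omega))
        have : l[ind + 1 + i] = l[ind] := le_antisymm hplel h1'
        rw [this]
        exact hmax _ (List.getElem_mem (by omega))
      · have h := hp2 (ind + 1 + i - k) (ind + 1 + j - k)
          (by simp; omega) (by simp; omega) (by omega)
        simp only [List.getElem_drop] at h
        have e1 : k + (ind + 1 + i - k) = ind + 1 + i := by omega
        have e2 : k + (ind + 1 + j - k) = ind + 1 + j := by omega
        simp only [e1, e2] at h
        exact h
  · rintro ⟨h1, h2⟩
    refine ⟨ind, by omega, ?_, ?_⟩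
    · rw [List.take_succ, List.getElem?_eq_getElem hlt]
      rw [List.isChain_append]
      refine ⟨h1, by simp, ?_⟩
      intro x hx y hy
      simp only [Option.toList_some, List.head?_cons, Option.mem_def, Option.some.injEq] at hy
      subst hy
      exact hmax x (List.mem_of_mem_take (List.mem_of_mem_getLast? hx))
    · rw [List.drop_eq_getElem_cons hlt, List.isChain_cons]
      refine ⟨?_, h2⟩
      intro y hy
      have : y ∈ l.drop (ind + 1) := List.mem_of_mem_head? hy
      exact hmax y (List.mem_of_mem_drop this)

theorem valley_iff_splitE (l : List Int) (ind : Nat) (hlt : ind < l.length)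
    (hmin : ∀ y ∈ l, l[ind] ≤ y) (hfirst : ∀ j (hj : j < ind), l[j] ≠ l[ind]) :
    ValleyE l ↔ (l.take ind).IsChain (· ≥ ·) ∧ (l.drop (ind + 1)).IsChain (· ≤ ·) := by
  constructor
  · rintro ⟨k, hk, h1, h2⟩
    have hp1 : (l.take (k + 1)).Pairwise (· ≥ ·) := List.isChain_iff_pairwise.mp h1
    have hp2 : (l.drop k).Pairwise (· ≤ ·) := List.isChain_iff_pairwise.mp h2
    rw [List.pairwise_iff_getElem] at hp1 hp2
    have hik : ind ≤ k := by
      by_contra hgt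
      push_neg at hgt
      have hkl : k < l.length := by omega
      have h := hp2 0 (ind - k) (by simp; omega) (by simp; omega) (by omega)
      simp only [List.getElem_drop] at h
      have hrw : k + (ind - k) = ind := by omega
      simp only [Nat.add_zero, hrw] at h
      have hle : l[ind] ≤ l[k] := hmin _ (List.getElem_mem hkl)
      exact hfirst k hgt (le_antisymm h hle)
    refine ⟨?_, ?_⟩
    · have heq : l.take ind = (l.take (k + 1)).take ind := by
        rw [List.take_take]; congr 1; omega
      rw [heq, List.isChain_iff_pairwise]
      exact (List.isChain_iff_pairwise.mp h1).sublist (List.take_sublist _ _)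
    · rw [List.isChain_iff_pairwise, List.pairwise_iff_getElem]
      intro i j hi hj hij
      simp only [List.length_drop] at hi hj
      simp only [List.getElem_drop]
      by_cases hpk : ind + 1 + i ≤ k
      · have h1' := hp1 ind (ind + 1 + i) (by simp; omega) (by simp; omega) (by omega)
        simp only [List.getElem_take] at h1'
        have hplel : l[ind] ≤ l[ind + 1 + i] := hmin _ (List.getElem_mem (by omega))
        have : l[ind + 1 + i] = l[ind] := le_antisymm h1' hplel
        rw [this]
        exact hmin _ (List.getElem_mem (by omega))
      · have h := hp2 (ind + 1 + i - k) (ind + 1 + j - k)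
          (by simp; omega) (by simp; omega) (by omega)
        simp only [List.getElem_drop] at h
        have e1 : k + (ind + 1 + i - k) = ind + 1 + i := by omega
        have e2 : k + (ind + 1 + j - k) = ind + 1 + j := by omega
        simp only [e1, e2] at h
        exact h
  · rintro ⟨h1, h2⟩
    refine ⟨ind, by omega, ?_, ?_⟩
    · rw [List.take_succ, List.getElem?_eq_getElem hlt]
      rw [List.isChain_append]
      refine ⟨h1, by simp, ?_⟩
      intro x hx y hy
      simp only [Option.toList_some, List.head?_cons, Option.mem_def, Option.some.injEq] at hy
      subst hy
      exact hmin x (List.mem_of_mem_take (List.mem_of_mem_getLast? hx))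
    · rw [List.drop_eq_getElem_cons hlt, List.isChain_cons]
      refine ⟨?_, h2⟩
      intro y hy
      have : y ∈ l.drop (ind + 1) := List.mem_of_mem_head? hy
      exact hmin y (List.mem_of_mem_drop this)

theorem scanDown_iff (xs : List Int) : nondecB (scanDown xs) = true ↔ Valley xs :=
  (scanDown_iffE xs).trans (valley_explicit xs).symm

theorem valley_iff_split (l : List Int) (ind : Nat) (hlt : ind < l.length)
    (hmin : ∀ y ∈ l, l[ind] ≤ y) (hfirst : ∀ j (hj : j < ind), l[j] ≠ l[ind]) :
    Valley l ↔ (l.take ind).IsChain (· ≥ ·) ∧ (l.drop (ind + 1)).IsChain (· ≤ ·) :=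
  (valley_explicit l).trans (valley_iff_splitE l ind hlt hmin hfirst)

-- xs == sorted(xs)  ⟺  xs is non-decreasing
theorem sorted_eq_self_iff (xs : List Int) :
    PySem.List.sorted xs (fun x => x) false = xs ↔ xs.IsChain (· ≤ ·) := by
  constructor
  · intro h
    rw [List.isChain_iff_pairwise]
    have := PySem.List.sorted_pairwise (xs := xs) (key := fun x => x)
    rwa [h] at this
  · intro h
    have hp : xs.Pairwise (· ≤ ·) := List.isChain_iff_pairwise.mp h
    exact PySem.List.sorted_eq_self_of_pairwise xs (fun x => x) hp

-- xs == sorted(xs)[::-1]  ⟺  xs is non-increasing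
theorem sorted_rev_eq_self_iff (xs : List Int) :
    (PySem.List.sorted xs (fun x => x) false).reverse = xs ↔ xs.IsChain (· ≥ ·) := by
  constructor
  · intro h
    rw [List.isChain_iff_pairwise]
    have hp := PySem.List.sorted_pairwise (xs := xs) (key := fun x => x)
    have : xs.reverse.Pairwise (fun a b : Int => a ≤ b) := by
      rw [← h, List.reverse_reverse]
      exact hp
    rw [List.pairwise_reverse] at this
    exact this.imp (fun h => h)
  · intro h
    have hp : xs.reverse.Pairwise (fun a b : Int => a ≤ b) := by
      rw [List.pairwise_reverse]
      exact (List.isChain_iff_pairwise.mp h).imp (fun h => h)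
    have := PySem.List.sorted_id_eq_of_perm_of_pairwise xs xs.reverse (List.reverse_perm xs) hp
    rw [this, List.reverse_reverse]

theorem out1 {C : Prop} [Decidable C] {b : Bool} (h : ¬C ↔ b = true) :
    (if C then "No" else "Yes") = (if b then "Yes" else "No") := by
  by_cases hc : C <;> cases b <;> simp_all

theorem out2 {C1 C2 : Prop} [Decidable C1] [Decidable C2] {b : Bool}
    (h : (¬C1 ∧ ¬C2) ↔ b = true) :
    (if C1 then "No" else if C2 then "No" else "Yes") = (if b then "Yes" else "No") := by
  by_cases h1 : C1 <;> by_cases h2 : C2 <;> cases b <;> simp_all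

theorem branch_max (l : List Int) (mx : Int) (res : Option String) (ind : Nat)
    (h2 : 2 ≤ l.length) (hidx : PySem.List.index? l mx = some ind)
    (hmax : ∀ y ∈ l, y ≤ mx)
    (hnofall : ∀ _ : ind + 1 < l.length, l[ind + 1] ≠ mx) :
    somaghBranch l mx res = some (if nonincB (scanUp l) then "Yes" else "No") := by
  obtain ⟨hlt, hval, hfirst⟩ := PySem.List.getElem_of_index?_eq_some hidx
  have hmaxi : ∀ y ∈ l, y ≤ l[ind] := by rw [hval]; exact hmax
  have hfirsti : ∀ j (hj : j < ind), l[j] ≠ l[ind] := by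
    intro j hj; rw [hval]; exact hfirst j hj
  have hsplit := (scanUp_iff l).trans (mountain_iff_split l ind hlt hmaxi hfirsti)
  have hc1 : ((ind : Int) + 1) = ((ind + 1 : Nat) : Int) := by push_cast; ring
  simp only [somaghBranch, hidx]
  by_cases hend : ind + 1 = l.length
  · have hind1 : 1 ≤ ind := by omega
    have hc2 : ((ind : Int) - 1) = ((ind - 1 : Nat) : Int) := by omega
    have hprev : PySem.List.pyGetD l ((ind : Int) - 1) 0 = l[ind - 1] := by
      rw [hc2, PySem.List.pyGetD_natCast, List.getD_eq_getElem _ _ (by omega)]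
    have hprevlt : l[ind - 1] < mx := by
      have h1 := hmax _ (List.getElem_mem (show ind - 1 < l.length by omega))
      have h2 := hfirst (ind - 1) (by omega)
      omega
    rw [if_neg (by rintro ⟨-, hgt⟩; rw [hprev] at hgt; omega),
        if_pos ⟨hend, by rw [hprev]; exact hprevlt⟩]
    congr 1
    rw [PySem.List.slice_to_natCast]
    apply out1
    rw [not_not, eq_comm, sorted_eq_self_iff, Iff.comm, hsplit, hend, List.drop_length]
    simp
  · have hlt1 : ind + 1 < l.length := by omega
    have hnxt : PySem.List.pyGetD l ((ind : Int) + 1) 0 = l[ind + 1] := by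
      rw [hc1, PySem.List.pyGetD_natCast, List.getD_eq_getElem _ _ hlt1]
    have hnxtlt : l[ind + 1] < mx := by
      have h1 := hmax _ (List.getElem_mem hlt1)
      have h2 := hnofall hlt1
      omega
    rw [if_neg (by rintro ⟨he, -⟩; exact hend he), if_neg (by rintro ⟨he, -⟩; exact hend he)]
    by_cases h0 : ind = 0
    · rw [if_neg (by rintro ⟨-, hgt⟩; rw [hnxt] at hgt; omega),
          if_pos ⟨h0, by rw [hnxt]; exact hnxtlt⟩]
      congr 1
      rw [hc1, PySem.List.slice_from_natCast]
      apply out1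
      rw [not_not, eq_comm, sorted_rev_eq_self_iff, Iff.comm, hsplit, h0]
      simp
    · rw [if_neg (by rintro ⟨he, -⟩; exact h0 he), if_neg (by rintro ⟨he, -⟩; exact h0 he),
          if_neg (by intro hgt; rw [hnxt] at hgt; omega),
          if_pos (by rw [hnxt]; exact hnxtlt)]
      congr 1
      rw [hc1, PySem.List.slice_from_natCast, PySem.List.slice_to_natCast]
      apply out2
      rw [not_not, not_not, eq_comm (a := l.drop (ind + 1)), eq_comm (a := l.take ind),
        sorted_rev_eq_self_iff, sorted_eq_self_iff, Iff.comm, hsplit, and_comm]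

theorem branch_min (l : List Int) (mn : Int) (res : Option String) (ind : Nat)
    (h2 : 2 ≤ l.length) (hidx : PySem.List.index? l mn = some ind)
    (hmin : ∀ y ∈ l, mn ≤ y)
    (hnofall : ∀ _ : ind + 1 < l.length, l[ind + 1] ≠ mn) :
    somaghBranch l mn res = some (if nondecB (scanDown l) then "Yes" else "No") := by
  obtain ⟨hlt, hval, hfirst⟩ := PySem.List.getElem_of_index?_eq_some hidx
  have hmini : ∀ y ∈ l, l[ind] ≤ y := by rw [hval]; exact hmin
  have hfirsti : ∀ j (hj : j < ind), l[j] ≠ l[ind] := by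
    intro j hj; rw [hval]; exact hfirst j hj
  have hsplit := (scanDown_iff l).trans (valley_iff_split l ind hlt hmini hfirsti)
  have hc1 : ((ind : Int) + 1) = ((ind + 1 : Nat) : Int) := by push_cast; ring
  simp only [somaghBranch, hidx]
  by_cases hend : ind + 1 = l.length
  · have hind1 : 1 ≤ ind := by omega
    have hc2 : ((ind : Int) - 1) = ((ind - 1 : Nat) : Int) := by omega
    have hprev : PySem.List.pyGetD l ((ind : Int) - 1) 0 = l[ind - 1] := by
      rw [hc2, PySem.List.pyGetD_natCast, List.getD_eq_getElem _ _ (by omega)]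
    have hprevgt : mn < l[ind - 1] := by
      have h1 := hmin _ (List.getElem_mem (show ind - 1 < l.length by omega))
      have h2 := hfirst (ind - 1) (by omega)
      omega
    rw [if_pos ⟨hend, by rw [hprev]; exact hprevgt⟩]
    congr 1
    rw [PySem.List.slice_to_natCast]
    apply out1
    rw [not_not, eq_comm, sorted_rev_eq_self_iff, Iff.comm, hsplit, hend, List.drop_length]
    simp
  · have hlt1 : ind + 1 < l.length := by omega
    have hnxt : PySem.List.pyGetD l ((ind : Int) + 1) 0 = l[ind + 1] := by
      rw [hc1, PySem.List.pyGetD_natCast, List.getD_eq_getElem _ _ hlt1]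
    have hnxtgt : mn < l[ind + 1] := by
      have h1 := hmin _ (List.getElem_mem hlt1)
      have h2 := hnofall hlt1
      omega
    rw [if_neg (by rintro ⟨he, -⟩; exact hend he), if_neg (by rintro ⟨he, -⟩; exact hend he)]
    by_cases h0 : ind = 0
    · rw [if_pos ⟨h0, by rw [hnxt]; exact hnxtgt⟩]
      congr 1
      rw [hc1, PySem.List.slice_from_natCast]
      apply out1
      rw [not_not, eq_comm, sorted_eq_self_iff, Iff.comm, hsplit, h0]
      simp
    · rw [if_neg (by rintro ⟨he, -⟩; exact h0 he), if_neg (by rintro ⟨he, -⟩; exact h0 he),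
          if_pos (by rw [hnxt]; exact hnxtgt)]
      congr 1
      rw [hc1, PySem.List.slice_from_natCast, PySem.List.slice_to_natCast]
      apply out2
      rw [not_not, not_not, eq_comm (a := l.drop (ind + 1)), eq_comm (a := l.take ind),
        sorted_eq_self_iff, sorted_rev_eq_self_iff, Iff.comm, hsplit, and_comm]

theorem branch_min_fall (l : List Int) (mn : Int) (res : Option String) (ind : Nat)
    (hidx : PySem.List.index? l mn = some ind) (hlt : ind + 1 < l.length)
    (hmin : ∀ y ∈ l, mn ≤ y) (hfall : l[ind + 1] = mn) :
    somaghBranch l mn res = res := by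
  have hc1 : ((ind : Int) + 1) = ((ind + 1 : Nat) : Int) := by push_cast; ring
  have hnxt : PySem.List.pyGetD l ((ind : Int) + 1) 0 = mn := by
    rw [hc1, PySem.List.pyGetD_natCast, List.getD_eq_getElem _ _ hlt, hfall]
  simp only [somaghBranch, hidx]
  rw [if_neg (by rintro ⟨he, -⟩; omega), if_neg (by rintro ⟨he, -⟩; omega),
      if_neg (by rintro ⟨-, hgt⟩; rw [hnxt] at hgt; omega),
      if_neg (by rintro ⟨-, hgt⟩; rw [hnxt] at hgt; omega),
      if_neg (by intro hgt; rw [hnxt] at hgt; omega),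
      if_neg (by intro hgt; rw [hnxt] at hgt; omega)]

-- the common part of somagh_spec and somagh_tight: within Pre_, the max-iteration facts
theorem somagh_eval (l : List Int) (hpre : Pre_somagh l) :
    ∃ mx mn indx indn,
      PySem.List.max? l (fun x => x) = some mx ∧
      PySem.List.min? l (fun x => x) = some mn ∧
      PySem.List.index? l mx = some indx ∧
      PySem.List.index? l mn = some indn ∧
      (∀ y ∈ l, y ≤ mx) ∧ (∀ y ∈ l, mn ≤ y) ∧
      somaghBranch l mx none = some (if nonincB (scanUp l) then "Yes" else "No") := by
  obtain ⟨h2, hnomax⟩ := hpre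
  have hne : l ≠ [] := by intro h; rw [h] at h2; simp at h2
  obtain ⟨mx, hmx⟩ : ∃ mx, PySem.List.max? l (fun x => x) = some mx := by
    cases hm : PySem.List.max? l (fun x => x) with
    | none => exact absurd ((PySem.List.max?_eq_none_iff l _).mp hm) hne
    | some m => exact ⟨m, rfl⟩
  obtain ⟨mn, hmn⟩ : ∃ mn, PySem.List.min? l (fun x => x) = some mn := by
    cases hm : PySem.List.min? l (fun x => x) with
    | none => exact absurd ((PySem.List.min?_eq_none_iff l _).mp hm) hne
    | some m => exact ⟨m, rfl⟩
  have hmxmax : ∀ y ∈ l, y ≤ mx := PySem.List.max?_isMax hmx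
  have hmnmin : ∀ y ∈ l, mn ≤ y := PySem.List.min?_isMin hmn
  obtain ⟨indx, hindx⟩ := Option.isSome_iff_exists.mp
    ((PySem.List.index?_isSome_iff l mx).mpr (PySem.List.max?_mem hmx))
  obtain ⟨indn, hindn⟩ := Option.isSome_iff_exists.mp
    ((PySem.List.index?_isSome_iff l mn).mpr (PySem.List.min?_mem hmn))
  obtain ⟨hltx, hvalx, hfirstx⟩ := PySem.List.getElem_of_index?_eq_some hindx
  have hnofallx : ∀ _ : indx + 1 < l.length, l[indx + 1] ≠ mx := by
    intro h hc
    exact hnomax ⟨⟨indx, hltx⟩, h, by rw [hvalx, hc],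
      by intro x hx; rw [hvalx]; exact hmxmax x hx,
      by intro j hj; rw [hvalx]; exact hfirstx j.1 hj⟩
  exact ⟨mx, mn, indx, indn, hmx, hmn, hindx, hindn, hmxmax, hmnmin,
    branch_max l mx none indx h2 hindx hmxmax hnofallx⟩

theorem somagh_spec : Claim_unchanged_somagh := by
  intro l _ hpre hnd
  obtain ⟨mx, mn, indx, indn, hmx, hmn, hindx, hindn, hmxmax, hmnmin, hbx⟩ :=
    somagh_eval l hpre
  obtain ⟨hltn, hvaln, hfirstn⟩ := PySem.List.getElem_of_index?_eq_some hindn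
  show somagh l = somagh_alt l
  cases hmt : nonincB (scanUp l) with
  | true =>
    have hA : somagh l = "Yes" := by
      simp only [somagh, hmx, hmn, hbx, hmt]; simp
    rw [hA, somagh_alt, hmt]; simp
  | false =>
    have hnm : ¬ Mountain l := by rw [← scanUp_iff, hmt]; simp
    by_cases hfall : ∃ _ : indn + 1 < l.length, l[indn + 1] = mn
    · obtain ⟨hf1, hf2⟩ := hfall
      have hbn := branch_min_fall l mn (some "No") indn hindn hf1 hmnmin hf2
      have hnv : ¬ Valley l := by
        intro hv
        apply hnd
        unfold D_somagh
        refine ⟨hv, hnm, ?_⟩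
        intro m hm
        rw [hmn, Option.mem_def, Option.some.injEq] at hm
        subst hm
        refine ⟨l.take indn, l.drop (indn + 2), ?_⟩
        have hdd : l.drop indn = mn :: mn :: l.drop (indn + 2) := by
          rw [List.drop_eq_getElem_cons hltn]
          rw [List.drop_eq_getElem_cons hf1]
          rw [hvaln, hf2]
        calc l.take indn ++ [mn, mn] ++ l.drop (indn + 2)
            = l.take indn ++ l.drop indn := by rw [List.append_assoc, hdd]; simp
          _ = l := List.take_append_drop indn l
      have hvy : nondecB (scanDown l) = false := by
        rw [← Bool.not_eq_true, scanDown_iff]; exact hnv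
      have hA : somagh l = "No" := by
        simp only [somagh, hmx, hmn, hbx, hmt]; simp [hbn]
      have hB : somagh_alt l = "No" := by rw [somagh_alt, hmt, hvy]; simp
      rw [hA, hB]
    · have hnofalln : ∀ _ : indn + 1 < l.length, l[indn + 1] ≠ mn := by
        intro h hc
        exact hfall ⟨h, hc⟩
      have hbn := branch_min l mn (some "No") indn hpre.1 hindn hmnmin hnofalln
      cases hvy : nondecB (scanDown l) with
      | false =>
        have hA : somagh l = "No" := by
          simp only [somagh, hmx, hmn, hbx, hmt]; simp [hbn, hvy]
        have hB : somagh_alt l = "No" := by rw [somagh_alt, hmt, hvy]; simp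
        rw [hA, hB]
      | true =>
        have hA : somagh l = "Yes" := by
          simp only [somagh, hmx, hmn, hbx, hmt]; simp [hbn, hvy]
        have hB : somagh_alt l = "Yes" := by rw [somagh_alt, hmt, hvy]; simp
        rw [hA, hB]

theorem somagh_changed : Claim_changed_somagh := by
  unfold Claim_changed_somagh; decide

theorem somagh_tight : Claim_exact_somagh := by
  intro l _ hpre hd
  obtain ⟨hv, hnm, hall⟩ := hd
  obtain ⟨mx, mn, indx, indn, hmx, hmn, hindx, hindn, hmxmax, hmnmin, hbx⟩ :=
    somagh_eval l hpre
  obtain ⟨hltn, hvaln, hfirstn⟩ := PySem.List.getElem_of_index?_eq_some hindn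
  have hmt : nonincB (scanUp l) = false := by
    rw [← Bool.not_eq_true, scanUp_iff]; exact hnm
  have hvy : nondecB (scanDown l) = true := by rw [scanDown_iff]; exact hv
  -- the infix [mn, mn] sits at position j = sp.length
  obtain ⟨sp, tp, hst⟩ := hall mn hmn
  have hst' : sp ++ (mn :: mn :: tp) = l := by
    simpa [List.append_assoc] using hst
  have hlj : sp.length + 1 < l.length := by
    rw [← hst']
    simp
  have hj0 : l[sp.length] = mn := by
    have h := List.getElem?_append_right (l₁ := sp) (l₂ := mn :: mn :: tp)
      (i := sp.length) (le_refl _)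
    rw [hst', List.getElem?_eq_getElem (by omega)] at h
    simp at h
    exact h
  have hj1 : l[sp.length + 1] = mn := by
    have h := List.getElem?_append_right (l₁ := sp) (l₂ := mn :: mn :: tp)
      (i := sp.length + 1) (by omega)
    rw [hst', List.getElem?_eq_getElem (by omega)] at h
    simp at h
    exact h
  -- the first occurrence of mn is followed by another mn
  have hfall : ∃ _ : indn + 1 < l.length, l[indn + 1] = mn := by
    have hile : indn ≤ sp.length := by
      by_contra hgt
      exact hfirstn sp.length (by omega) hj0
    rcases Nat.eq_or_lt_of_le hile with heqi | hlti
    · refine ⟨by omega, ?_⟩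
      simp only [heqi]
      exact hj1
    · -- indn < j: use the valley structure
      have hmini : ∀ y ∈ l, l[indn] ≤ y := by rw [hvaln]; exact hmnmin
      have hfirsti : ∀ j (hj : j < indn), l[j] ≠ l[indn] := by
        intro j hj; rw [hvaln]; exact hfirstn j hj
      have hsuf := ((valley_iff_split l indn hltn hmini hfirsti).mp hv).2
      have hlen1 : indn + 1 < l.length := by omega
      refine ⟨hlen1, ?_⟩
      rcases Nat.eq_or_lt_of_le (show indn + 1 ≤ sp.length by omega) with heqi1 | hlti1
      · simp only [heqi1]
        exact hj0
      · have hp := List.isChain_iff_pairwise.mp hsuf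
        rw [List.pairwise_iff_getElem] at hp
        have h := hp 0 (sp.length - (indn + 1)) (by simp; omega) (by simp; omega) (by omega)
        simp only [List.getElem_drop] at h
        have e1 : indn + 1 + 0 = indn + 1 := by omega
        have e2 : indn + 1 + (sp.length - (indn + 1)) = sp.length := by omega
        simp only [e1, e2, hj0] at h
        have := hmnmin _ (List.getElem_mem hlen1)
        omega
  obtain ⟨hf1, hf2⟩ := hfall
  have hbn := branch_min_fall l mn (some "No") indn hindn hf1 hmnmin hf2
  have hA : somagh l = "No" := by
    simp only [somagh, hmx, hmn, hbx, hmt]; simp [hbn]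
  have hB : somagh_alt l = "Yes" := by rw [somagh_alt, hmt, hvy]; simp
  rw [hA, hB]
  decide
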